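-- pv_equiv track=rewrite | github.com/LiamSarwas/Advent-of-Code | 2019/day16/part1.py | calc_num
-- ===== SOURCE A (Python) =====
-- def calc_num(l, i):
--     pattern = [0]*i
--     pattern += [1]*i
--     pattern += [0]*i
--     pattern += [-1]*i
--     while len(pattern) <= len(l):
--         pattern += pattern
--
--     pattern = pattern[1:len(l)+1]
--
--     return int(str(sum(a[0]*a[1] for a in zip(pattern, l)))[-1])
-- ===== SOURCE B (Python) =====
-- def calc_num(l, i):
--     # Pattern-free: the repeating FFT pattern value for position j is determined
--     # by (j+1) mod 4i, so compute each coefficient arithmetically instead of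
--     # materialising and doubling a pattern list.
--     p = 4 * i
--     total = 0
--     for j, v in enumerate(l):
--         r = (j + 1) % p
--         if i <= r < 2 * i:
--             total += v
--         elif r >= 3 * i:
--             total -= v
--     return int(str(total)[-1])
-- ===== Notes on version B (the rewrite author's own statement) =====
-- stated objective: simpler
-- what changed: B never builds or doubles a pattern list: the FFT coefficient of element j is computed arithmetically from (j+1) mod 4i in a single pass over the list, using O(1) extra space instead of materialising a pattern at least as long as the input.
import Mathlib
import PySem

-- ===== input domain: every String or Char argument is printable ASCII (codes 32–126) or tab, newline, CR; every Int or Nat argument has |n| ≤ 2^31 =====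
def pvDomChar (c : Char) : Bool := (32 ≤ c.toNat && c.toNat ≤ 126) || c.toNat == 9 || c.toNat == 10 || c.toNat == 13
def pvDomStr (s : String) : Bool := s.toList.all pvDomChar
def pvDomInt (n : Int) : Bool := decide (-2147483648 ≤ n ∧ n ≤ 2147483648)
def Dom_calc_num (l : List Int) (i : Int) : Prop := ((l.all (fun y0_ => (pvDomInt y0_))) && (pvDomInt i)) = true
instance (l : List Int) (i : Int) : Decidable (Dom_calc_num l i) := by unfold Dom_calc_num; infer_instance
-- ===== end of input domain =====

-- B computes each pattern coefficient from (j+1) mod 4i instead of building and doubling a pattern list (simpler, O(1) extra space).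

-- shared transliteration of the final step `int(str(total)[-1])` of both Pythons:
-- str(total) is nonempty and ends in a digit, so s[-1] is its last char and int() succeeds
-- (the .getD 0 defaults are unreachable there).
def pyLastDigit (n : Int) : Int :=
  ((PySem.Int.toChars n).getLast?.bind (fun c => PySem.Int.ofChars? [c])).getD 0

-- ===== PORT A =====
-- pattern = [0]*i + [1]*i + [0]*i + [-1]*i   ([x]*i is empty for i ≤ 0, as Python)
def basePattern (i : Int) : List Int :=
  List.replicate i.toNat 0 ++ List.replicate i.toNat 1 ++ List.replicate i.toNat 0 ++ List.replicate i.toNat (-1)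

-- `while len(pattern) <= len(l): pattern += pattern` — fuel only makes the loop total;
-- under Pre_ (i ≥ 1) the fuel l.length + 1 is never exhausted before the guard fails.
def growPattern (n : Nat) : Nat → List Int → List Int
  | 0, p => p
  | fuel + 1, p => if p.length ≤ n then growPattern n fuel (p ++ p) else p

def calc_num (l : List Int) (i : Int) : Int :=
  let pattern0 := basePattern i
  let pattern1 := growPattern l.length (l.length + 1) pattern0
  let pattern2 := PySem.List.slice pattern1 (some 1) (some ((l.length : Int) + 1))
  pyLastDigit ((pattern2.zip l).foldl (fun s a => s + a.1 * a.2) 0)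

-- ===== PORT B =====
def calc_num_alt (l : List Int) (i : Int) : Int :=
  let p := 4 * i
  let total := (PySem.List.enumerate l 0).foldl (fun total jv =>
    let r := PySem.Int.mod (jv.1 + 1) p
    if i ≤ r ∧ r < 2 * i then total + jv.2
    else if 3 * i ≤ r then total - jv.2
    else total) 0
  pyLastDigit total

-- ===== PRECONDITION & SPEC =====
-- Pre_ excludes i ≤ 0: there Python A never terminates (the doubling while-loop keeps
-- the empty pattern empty), so A returns on exactly the inputs with i ≥ 1.
def Pre_calc_num (l : List Int) (i : Int) : Prop := 1 ≤ i
instance (l : List Int) (i : Int) : Decidable (Pre_calc_num l i) := by unfold Pre_calc_num; infer_instance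
def pvWitness_calc_num : List Int × Int := ([1, 2, 3, 4, 5], 2)

def Spec_calc_num (l : List Int) (i : Int) (out : Int) : Prop := out = calc_num_alt l i
instance (l : List Int) (i : Int) (out : Int) : Decidable (Spec_calc_num l i out) := by unfold Spec_calc_num; infer_instance

-- ===== CLAIM (what is proved, stated in full; the proofs are below) =====
def Claim_equal_calc_num : Prop := ∀ (l : List Int) (i : Int), Dom_calc_num l i → Pre_calc_num l i → Spec_calc_num l i (calc_num l i)

-- ===== LEMMAS AND PROOFS =====

-- the pattern value at (shifted) position r within one period of length 4*I
def patVal (I r : Nat) : Int :=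
  if r < I then 0 else if r < 2 * I then 1 else if r < 3 * I then 0 else -1

theorem basePattern_length (i : Int) : (basePattern i).length = 4 * i.toNat := by
  simp [basePattern]; omega

theorem basePattern_getElem? (i : Int) (r : Nat) (hr : r < 4 * i.toNat) :
    (basePattern i)[r]? = some (patVal i.toNat r) := by
  unfold basePattern patVal
  simp only [List.getElem?_append, List.length_append, List.length_replicate, List.getElem?_replicate]
  split_ifs <;> simp_all <;> omega

theorem growPattern_shape (n : Nat) (i : Int) : ∀ (fuel m : Nat),
    ∃ m', growPattern n fuel (List.flatten (List.replicate m (basePattern i))) =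
      List.flatten (List.replicate m' (basePattern i)) := by
  intro fuel
  induction fuel with
  | zero => intro m; exact ⟨m, rfl⟩
  | succ f ih =>
    intro m
    unfold growPattern
    split
    · obtain ⟨m', hm'⟩ := ih (m + m)
      exact ⟨m', by rw [← hm', List.replicate_add, List.flatten_append]⟩
    · exact ⟨m, rfl⟩

theorem growPattern_length (n : Nat) : ∀ (fuel : Nat) (p : List Int), 1 ≤ p.length →
    n < (growPattern n fuel p).length ∨ p.length + fuel ≤ (growPattern n fuel p).length := by
  intro fuel
  induction fuel with
  | zero => intro p hp; right; simp [growPattern]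
  | succ f ih =>
    intro p hp
    unfold growPattern
    split
    · rcases ih (p ++ p) (by simp; omega) with h | h
      · left; exact h
      · right; simp at h ⊢; omega
    · left; omega

theorem flatten_replicate_getElem? (b : List Int) : ∀ (m j : Nat), j < m * b.length →
    (List.flatten (List.replicate m b))[j]? = b[j % b.length]? := by
  intro m
  induction m with
  | zero => intro j h; omega
  | succ m ih =>
    intro j h
    rw [Nat.succ_mul] at h
    have hb : 0 < b.length := by
      rcases Nat.eq_zero_or_pos b.length with h0 | h0
      · rw [h0] at h; simp at h
      · exact h0
    rw [List.replicate_succ, List.flatten_cons, List.getElem?_append]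
    split
    · rename_i hj
      rw [Nat.mod_eq_of_lt hj]
    · rename_i hj
      rw [ih (j - b.length) (by omega)]
      congr 1
      exact (Nat.mod_eq_sub_mod (by omega)).symm

theorem enumerate_getElem? (xs : List Int) : ∀ (s : Int) (j : Nat),
    (PySem.List.enumerate xs s)[j]? = xs[j]?.map (fun v => (s + j, v)) := by
  induction xs with
  | nil => intro s j; simp [PySem.List.enumerate_nil]
  | cons x xs ih =>
    intro s j
    rw [PySem.List.enumerate_cons]
    cases j with
    | zero => simp
    | succ j =>
      simp only [List.getElem?_cons_succ, ih (s + 1) j]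
      cases xs[j]?
      · simp
      · simp
        ring_nf

-- ===== VERDICT (by name: the statement is the Claim_ definition above) =====
theorem calc_num_spec : Claim_equal_calc_num := by
  intro l i _ hpre
  unfold Pre_calc_num at hpre
  show calc_num l i = calc_num_alt l i
  simp only [calc_num, calc_num_alt]
  have hiI : ((i.toNat : Nat) : Int) = i := Int.toNat_of_nonneg (by omega)
  obtain ⟨m, hm⟩ : ∃ m, growPattern l.length (l.length + 1) (basePattern i) =
      List.flatten (List.replicate m (basePattern i)) := by
    simpa using growPattern_shape l.length i (l.length + 1) 1
  have hblen : (basePattern i).length = 4 * i.toNat := basePattern_length i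
  have hlen : l.length < (growPattern l.length (l.length + 1) (basePattern i)).length := by
    rcases growPattern_length l.length (l.length + 1) (basePattern i) (by rw [hblen]; omega) with h | h
    · exact h
    · rw [hblen] at h; omega
  have hp1len : (growPattern l.length (l.length + 1) (basePattern i)).length = m * (4 * i.toNat) := by
    rw [hm]; simp [List.length_flatten, List.map_replicate, hblen]
  have hslice : PySem.List.slice (growPattern l.length (l.length + 1) (basePattern i))
      (some 1) (some ((l.length : Int) + 1)) =
      ((growPattern l.length (l.length + 1) (basePattern i)).drop 1).take l.length := by
    rw [PySem.List.slice_toNat _ (by omega) (by omega)]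
    have h1 : ((l.length : Int) + 1).toNat = l.length + 1 := by omega
    have h2 : Int.toNat 1 = 1 := rfl
    rw [h1, h2]
    norm_num
  rw [hslice]
  congr 1
  have hfun : (fun (total : Int) (jv : Int × Int) =>
      if i ≤ PySem.Int.mod (jv.1 + 1) (4 * i) ∧ PySem.Int.mod (jv.1 + 1) (4 * i) < 2 * i then total + jv.2
      else if 3 * i ≤ PySem.Int.mod (jv.1 + 1) (4 * i) then total - jv.2 else total)
      = (fun (total : Int) (jv : Int × Int) => total +
          (if i ≤ PySem.Int.mod (jv.1 + 1) (4 * i) ∧ PySem.Int.mod (jv.1 + 1) (4 * i) < 2 * i then jv.2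
           else if 3 * i ≤ PySem.Int.mod (jv.1 + 1) (4 * i) then -jv.2 else 0)) := by
    funext t jv; split_ifs <;> ring
  rw [hfun, PySem.List.foldl_add, PySem.List.foldl_add]
  congr 1
  refine congrArg List.sum ?_
  apply List.ext_getElem?
  intro j
  rw [List.getElem?_map, List.getElem?_map, enumerate_getElem?]
  by_cases hj : j < l.length
  · have htl : (List.take l.length (List.drop 1 (growPattern l.length (l.length + 1) (basePattern i)))).length = l.length := by
      simp [List.length_take]; omega
    have hzip : ((List.take l.length (List.drop 1 (growPattern l.length (l.length + 1) (basePattern i)))).zip l)[j]? =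
        some ((List.take l.length (List.drop 1 (growPattern l.length (l.length + 1) (basePattern i))))[j]'(by omega), l[j]) := by
      rw [List.getElem?_eq_getElem (by simp [List.length_zip]; omega)]
      simp [List.getElem_zip]
    rw [hzip, List.getElem?_eq_getElem hj]
    have hpat : (List.take l.length (List.drop 1 (growPattern l.length (l.length + 1) (basePattern i))))[j]'(by omega) =
        patVal i.toNat ((j + 1) % (4 * i.toNat)) := by
      have e1 : (List.take l.length (List.drop 1 (growPattern l.length (l.length + 1) (basePattern i))))[j]? =
          (growPattern l.length (l.length + 1) (basePattern i))[j + 1]? := by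
        rw [List.getElem?_take_of_lt hj, List.getElem?_drop]
        congr 1
        omega
      rw [hm] at hlen hp1len
      have e2 : (growPattern l.length (l.length + 1) (basePattern i))[j + 1]? =
          some (patVal i.toNat ((j + 1) % (4 * i.toNat))) := by
        rw [hm, flatten_replicate_getElem? _ m (j + 1) (by rw [hblen]; omega)]
        rw [hblen, basePattern_getElem? i _ (Nat.mod_lt _ (by omega))]
      rw [List.getElem?_eq_getElem (by omega)] at e1
      rw [← e1] at e2
      exact Option.some.inj e2
    rw [hpat]
    simp only [Option.map_some]
    congr 1
    have hmod : PySem.Int.mod (0 + (j : Int) + 1) (4 * i) = (((j + 1) % (4 * i.toNat) : Nat) : Int) := by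
      rw [show (0 + (j : Int) + 1) = ((j + 1 : Nat) : Int) by push_cast; ring,
          show (4 * i) = ((4 * i.toNat : Nat) : Int) by omega,
          PySem.Int.mod_natCast]
    simp only [hmod]
    have hrlt : (j + 1) % (4 * i.toNat) < 4 * i.toNat := Nat.mod_lt _ (by omega)
    generalize (j + 1) % (4 * i.toNat) = r at hrlt ⊢
    unfold patVal
    split_ifs <;> first | (exfalso; omega) | ring
  · have hnone : l[j]? = none := List.getElem?_eq_none (by omega)
    rw [hnone]
    rw [List.getElem?_eq_none]
    · simp
    · simp [List.length_zip]
      omega
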